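-- pv_equiv track=rewrite | github.com/cshukai/image_annotation_formatter | detectWrongBndBox.py | findWrongBndBox
-- ===== SOURCE A (Python) =====
-- def findWrongBndBox(width,height,xmaxs,xmins,ymaxs,ymins,filename):
--     badImgList=[]
--     for idx,xmax in enumerate(xmaxs):
--         if xmax > width:
--             badImgList.append(filename)
--         if  xmins[idx]<0:
--             badImgList.append(filename)
--         if  ymins[idx]<0:
--             badImgList.append(filename)
--         if  ymaxs[idx]>height :
--             badImgList.append(filename)
--     if badImgList==[] :
--        badImgList.append("not_found")
--     return(badImgList)
-- ===== SOURCE B (Python) =====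
-- def findWrongBndBox(width, height, xmaxs, xmins, ymaxs, ymins, filename):
--     # Four independent column passes: filter each coordinate list (the indexed
--     # ones truncated to the n boxes A inspects) and add up the filtered lengths.
--     n = len(xmaxs)
--     bad = (len([v for v in xmaxs if v > width])
--            + len([v for v in xmins[:n] if v < 0])
--            + len([v for v in ymins[:n] if v < 0])
--            + len([v for v in ymaxs[:n] if v > height]))
--     return [filename] * bad if bad else ["not_found"]
-- ===== Notes on version B (the rewrite author's own statement) =====
-- stated objective: simpler
-- what changed: A walks the boxes row by row with an index testing four conditions per box and appending; B makes four independent column passes - it filters each coordinate list (truncated to the length A inspects) against its single bound, sums the filtered lengths and replicates the filename that many times - no index variable and no per-row loop.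
import Mathlib
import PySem

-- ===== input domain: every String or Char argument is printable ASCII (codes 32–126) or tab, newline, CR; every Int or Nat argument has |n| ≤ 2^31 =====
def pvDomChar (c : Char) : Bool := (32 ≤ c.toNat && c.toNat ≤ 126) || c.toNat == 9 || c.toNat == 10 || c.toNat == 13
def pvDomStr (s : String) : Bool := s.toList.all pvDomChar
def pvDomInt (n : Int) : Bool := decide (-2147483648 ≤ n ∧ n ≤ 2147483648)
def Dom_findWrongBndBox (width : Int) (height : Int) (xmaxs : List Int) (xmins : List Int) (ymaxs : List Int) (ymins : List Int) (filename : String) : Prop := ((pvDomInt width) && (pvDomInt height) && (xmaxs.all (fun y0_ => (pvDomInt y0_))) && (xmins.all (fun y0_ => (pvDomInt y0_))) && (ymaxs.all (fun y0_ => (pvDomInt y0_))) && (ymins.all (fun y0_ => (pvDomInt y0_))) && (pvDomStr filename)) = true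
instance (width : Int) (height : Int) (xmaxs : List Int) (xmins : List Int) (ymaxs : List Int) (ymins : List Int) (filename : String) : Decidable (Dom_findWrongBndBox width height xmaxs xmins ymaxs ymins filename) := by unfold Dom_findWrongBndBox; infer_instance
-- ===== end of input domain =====

-- B replaces A's indexed per-box loop by four independent column filter passes whose
-- lengths are summed and replicated — simpler decomposition, same cost.

-- ===== PORT A =====
def findWrongBndBox (width : Int) (height : Int) (xmaxs : List Int) (xmins : List Int) (ymaxs : List Int) (ymins : List Int) (filename : String) : List String :=
  let badImgList : List String :=
    (PySem.List.enumerate xmaxs 0).foldl (fun acc p =>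
      let idx := p.1
      let xmax := p.2
      let acc := if xmax > width then acc ++ [filename] else acc
      let acc := if PySem.List.pyGetD xmins idx 0 < 0 then acc ++ [filename] else acc
      let acc := if PySem.List.pyGetD ymins idx 0 < 0 then acc ++ [filename] else acc
      if PySem.List.pyGetD ymaxs idx 0 > height then acc ++ [filename] else acc) []
  if badImgList = [] then ["not_found"] else badImgList

-- ===== PORT B =====
def findWrongBndBox_alt (width : Int) (height : Int) (xmaxs : List Int) (xmins : List Int) (ymaxs : List Int) (ymins : List Int) (filename : String) : List String :=
  let n : Int := PySem.List.len xmaxs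
  let bad : Nat :=
    (xmaxs.filter (fun v => v > width)).length
    + ((PySem.List.slice xmins none (some n)).filter (fun v => v < 0)).length
    + ((PySem.List.slice ymins none (some n)).filter (fun v => v < 0)).length
    + ((PySem.List.slice ymaxs none (some n)).filter (fun v => v > height)).length
  if bad ≠ 0 then List.replicate bad filename else ["not_found"]

-- ===== PRECONDITION & SPEC =====
-- Pre_ excludes exactly the inputs on which Python A raises IndexError: the three
-- lists indexed by position must be at least as long as xmaxs.
def Pre_findWrongBndBox (width : Int) (height : Int) (xmaxs : List Int) (xmins : List Int) (ymaxs : List Int) (ymins : List Int) (filename : String) : Prop :=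
  xmaxs.length ≤ xmins.length ∧ xmaxs.length ≤ ymins.length ∧ xmaxs.length ≤ ymaxs.length
instance (width : Int) (height : Int) (xmaxs : List Int) (xmins : List Int) (ymaxs : List Int) (ymins : List Int) (filename : String) : Decidable (Pre_findWrongBndBox width height xmaxs xmins ymaxs ymins filename) := by unfold Pre_findWrongBndBox; infer_instance

def pvWitness_findWrongBndBox : Int × Int × List Int × List Int × List Int × List Int × String :=
  (5, 5, [6, 2], [-1, 0], [3, 7], [0, 1], "img.jpg")

def Spec_findWrongBndBox (width : Int) (height : Int) (xmaxs : List Int) (xmins : List Int) (ymaxs : List Int) (ymins : List Int) (filename : String) (out : List String) : Prop := out = findWrongBndBox_alt width height xmaxs xmins ymaxs ymins filename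
instance (width : Int) (height : Int) (xmaxs : List Int) (xmins : List Int) (ymaxs : List Int) (ymins : List Int) (filename : String) (out : List String) : Decidable (Spec_findWrongBndBox width height xmaxs xmins ymaxs ymins filename out) := by unfold Spec_findWrongBndBox; infer_instance

-- ===== CLAIM (what is proved, stated in full; the proofs are below) =====
def Claim_equal_findWrongBndBox : Prop := ∀ (width : Int) (height : Int) (xmaxs : List Int) (xmins : List Int) (ymaxs : List Int) (ymins : List Int) (filename : String), Dom_findWrongBndBox width height xmaxs xmins ymaxs ymins filename → Pre_findWrongBndBox width height xmaxs xmins ymaxs ymins filename → Spec_findWrongBndBox width height xmaxs xmins ymaxs ymins filename (findWrongBndBox width height xmaxs xmins ymaxs ymins filename)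

-- ===== LEMMAS AND PROOFS =====

-- Folding "append (c j) copies of x at each step" is one big replicate.
theorem foldl_append_replicate {α β : Type} (x : α) (c : β → Nat) :
    ∀ (l : List β) (acc : List α),
      l.foldl (fun acc j => acc ++ List.replicate (c j) x) acc
        = acc ++ List.replicate ((l.map c).sum) x := by
  intro l
  induction l with
  | nil => intro acc; simp
  | cons j t ih =>
      intro acc
      simp only [List.foldl_cons, List.map_cons, List.sum_cons, ih, List.replicate_add,
        List.append_assoc]

-- Reading xs at every index of range(n) with n ≤ len xs yields xs's first n elements.
theorem map_getD_range_take (xs : List Int) (n : Nat) (h : n ≤ xs.length) :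
    (PySem.List.pyRange 0 (n : Int) 1).map (fun i => PySem.List.pyGetD xs i 0)
      = xs.take n := by
  have hlen : (xs.take n).length = n := by simp [h]
  have hcongr : (PySem.List.pyRange 0 (n : Int) 1).map (fun i => PySem.List.pyGetD xs i 0)
      = (PySem.List.pyRange 0 (n : Int) 1).map (fun i => PySem.List.pyGetD (xs.take n) i 0) := by
    apply List.map_congr_left
    intro i hi
    rcases PySem.List.mem_pyRange_one.mp hi with ⟨h0, hn⟩
    rw [PySem.List.pyGetD_eq_getElem xs 0 h0 (by omega),
        PySem.List.pyGetD_eq_getElem (xs.take n) 0 h0 (by omega)]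
    simp [List.getElem_take]
  rw [hcongr]
  have := PySem.List.map_pyGetD_pyRange_zero (xs.take n) 0
  simpa [PySem.List.len_eq, hlen] using this

-- An indicator sum over range(n) is the length of the column filter on take n.
theorem sum_ind_range_eq_filter_length (P : Int → Prop) [DecidablePred P]
    (xs : List Int) (n : Nat) (h : n ≤ xs.length) :
    ((PySem.List.pyRange 0 (n : Int) 1).map
        (fun i => if P (PySem.List.pyGetD xs i 0) then (1 : Int) else 0)).sum
      = ((xs.take n).filter (fun v => P v)).length := by
  have hb : (fun i => if P (PySem.List.pyGetD xs i 0) then (1 : Int) else 0)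
      = (fun i => if (fun j => decide (P (PySem.List.pyGetD xs j 0))) i = true then (1 : Int) else 0) := by
    funext i; simp
  rw [hb, PySem.List.sum_map_ite_one_zero]
  have : (PySem.List.pyRange 0 (n : Int) 1).countP (fun j => decide (P (PySem.List.pyGetD xs j 0)))
      = ((PySem.List.pyRange 0 (n : Int) 1).map (fun i => PySem.List.pyGetD xs i 0)).countP
          (fun v => decide (P v)) := by
    rw [List.countP_map]; rfl
  rw [this, map_getD_range_take xs n h, List.countP_eq_length_filter]

-- Casting a sum of toNat's of nonnegative terms back to Int recovers the Int sum.
theorem sum_toNat_of_nonneg {β : Type} (g : β → Int) (hg : ∀ j, 0 ≤ g j) :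
    ∀ (l : List β), ((l.map (fun j => (g j).toNat)).sum : Int) = (l.map g).sum := by
  intro l
  induction l with
  | nil => simp
  | cons j t ih =>
      simp only [List.map_cons, List.sum_cons]
      rw [Nat.cast_add, ih, Int.toNat_of_nonneg (hg j)]

theorem findWrongBndBox_eq_alt (width : Int) (height : Int) (xmaxs : List Int)
    (xmins : List Int) (ymaxs : List Int) (ymins : List Int) (filename : String)
    (pre : Pre_findWrongBndBox width height xmaxs xmins ymaxs ymins filename) :
    findWrongBndBox width height xmaxs xmins ymaxs ymins filename
      = findWrongBndBox_alt width height xmaxs xmins ymaxs ymins filename := by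
  obtain ⟨h1, h2, h3⟩ := pre
  set g : Int → Int := fun i =>
      (if PySem.List.pyGetD xmaxs i 0 > width then (1 : Int) else 0)
      + (if PySem.List.pyGetD xmins i 0 < 0 then 1 else 0)
      + (if PySem.List.pyGetD ymins i 0 < 0 then 1 else 0)
      + (if PySem.List.pyGetD ymaxs i 0 > height then 1 else 0) with hgdef
  have hg : ∀ j, 0 ≤ g j := by
    intro j; rw [hgdef]; dsimp only; split_ifs <;> norm_num
  set l := PySem.List.pyRange 0 xmaxs.length 1 with hl
  -- A's loop: a fold over the index range that appends (g j).toNat copies per step,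
  -- hence one replicate of the total row sum.
  have hloop :
      (PySem.List.enumerate xmaxs 0).foldl (fun acc p =>
        let idx := p.1
        let xmax := p.2
        let acc := if xmax > width then acc ++ [filename] else acc
        let acc := if PySem.List.pyGetD xmins idx 0 < 0 then acc ++ [filename] else acc
        let acc := if PySem.List.pyGetD ymins idx 0 < 0 then acc ++ [filename] else acc
        if PySem.List.pyGetD ymaxs idx 0 > height then acc ++ [filename] else acc) []
      = List.replicate ((l.map (fun j => (g j).toNat)).sum) filename := by
    rw [PySem.List.enumerate_eq_map_pyRange (d := 0), List.foldl_map]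
    have hstep : (fun (acc : List String) (j : Int) =>
        let idx := (j, PySem.List.pyGetD xmaxs j 0).1
        let xmax := (j, PySem.List.pyGetD xmaxs j 0).2
        let acc := if xmax > width then acc ++ [filename] else acc
        let acc := if PySem.List.pyGetD xmins idx 0 < 0 then acc ++ [filename] else acc
        let acc := if PySem.List.pyGetD ymins idx 0 < 0 then acc ++ [filename] else acc
        if PySem.List.pyGetD ymaxs idx 0 > height then acc ++ [filename] else acc)
        = (fun acc j => acc ++ List.replicate ((g j).toNat) filename) := by
      funext acc j
      rw [hgdef]; dsimp only
      split_ifs <;> simp [List.append_assoc]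
    rw [hstep, foldl_append_replicate, List.nil_append]
    simp only [PySem.List.len_eq, ← hl]
  -- The row sum equals B's total of the four column filter lengths.
  have hcols :
      (l.map g).sum
        = ((xmaxs.filter (fun v => v > width)).length
          + ((PySem.List.slice xmins none (some (PySem.List.len xmaxs))).filter (fun v => v < 0)).length
          + ((PySem.List.slice ymins none (some (PySem.List.len xmaxs))).filter (fun v => v < 0)).length
          + ((PySem.List.slice ymaxs none (some (PySem.List.len xmaxs))).filter (fun v => v > height)).length : Nat) := by
    have hsplit : (l.map g).sum
        = (l.map (fun i => if PySem.List.pyGetD xmaxs i 0 > width then (1 : Int) else 0)).sum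
        + (l.map (fun i => if PySem.List.pyGetD xmins i 0 < 0 then (1 : Int) else 0)).sum
        + (l.map (fun i => if PySem.List.pyGetD ymins i 0 < 0 then (1 : Int) else 0)).sum
        + (l.map (fun i => if PySem.List.pyGetD ymaxs i 0 > height then (1 : Int) else 0)).sum := by
      rw [hgdef]
      simp only [← List.sum_map_add]
    have e1 := sum_ind_range_eq_filter_length (fun v => v > width) xmaxs xmaxs.length le_rfl
    have e2 := sum_ind_range_eq_filter_length (fun v => v < 0) xmins xmaxs.length h1
    have e3 := sum_ind_range_eq_filter_length (fun v => v < 0) ymins xmaxs.length h2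
    have e4 := sum_ind_range_eq_filter_length (fun v => v > height) ymaxs xmaxs.length h3
    rw [hsplit, ← hl] at *
    rw [e1, e2, e3, e4]
    have hs : ∀ (zs : List Int), PySem.List.slice zs none (some (PySem.List.len xmaxs))
        = zs.take xmaxs.length := by
      intro zs
      rw [PySem.List.len_eq]
      exact PySem.List.slice_to_natCast zs xmaxs.length
    rw [hs, hs, hs]
    push_cast
    simp [List.take_of_length_le]
  -- Assemble.
  have hsum : ((l.map (fun j => (g j).toNat)).sum : Int) = (l.map g).sum :=
    sum_toNat_of_nonneg g hg l
  show (if _ = ([] : List String) then _ else _) = _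
  rw [hloop]
  unfold findWrongBndBox_alt
  dsimp only
  have hN : (l.map (fun j => (g j).toNat)).sum
      = ((xmaxs.filter (fun v => v > width)).length
        + ((PySem.List.slice xmins none (some (PySem.List.len xmaxs))).filter (fun v => v < 0)).length
        + ((PySem.List.slice ymins none (some (PySem.List.len xmaxs))).filter (fun v => v < 0)).length
        + ((PySem.List.slice ymaxs none (some (PySem.List.len xmaxs))).filter (fun v => v > height)).length : Nat) := by
    have := hsum.trans hcols
    exact_mod_cast this
  rw [hN]
  by_cases hz : ((xmaxs.filter (fun v => v > width)).length
      + ((PySem.List.slice xmins none (some (PySem.List.len xmaxs))).filter (fun v => v < 0)).length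
      + ((PySem.List.slice ymins none (some (PySem.List.len xmaxs))).filter (fun v => v < 0)).length
      + ((PySem.List.slice ymaxs none (some (PySem.List.len xmaxs))).filter (fun v => v > height)).length : Nat) = 0
  · rw [hz]
    simp
  · rw [if_neg (by simp only [List.replicate_eq_nil_iff]; exact hz), if_pos hz]

-- ===== VERDICT (by name: the statement is the Claim_ definition above) =====
theorem findWrongBndBox_spec : Claim_equal_findWrongBndBox := by
  intro width height xmaxs xmins ymaxs ymins filename _ hpre
  unfold Spec_findWrongBndBox
  exact findWrongBndBox_eq_alt width height xmaxs xmins ymaxs ymins filename hpre
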